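-- pv_equiv track=rewrite | github.com/dj-lumiere/problem-solving-boj | 백준/Gold/2064. IP 주소/IP 주소.py | number_form
-- ===== SOURCE A (Python) =====
-- def number_form(ip_address: str) -> int:
--     ip_address_numbers = list(map(int, ip_address.split(".")))
--     result = 0
--     for v in ip_address_numbers:
--         result += v
--         result <<= 8
--     result >>= 8
--     return result
-- ===== SOURCE B (Python) =====
-- def number_form(ip_address: str) -> int:
--     parts = ip_address.split(".")
--     n = len(parts)
--     return sum(int(v) << (8 * (n - 1 - i)) for i, v in enumerate(parts))
-- ===== Notes on version B (the rewrite author's own statement) =====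
-- stated objective: simpler
-- what changed: Replaces the Horner-style accumulate-then-shift loop (with a trailing corrective right shift) by a direct positional place-value sum over enumerated groups.
import Mathlib
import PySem

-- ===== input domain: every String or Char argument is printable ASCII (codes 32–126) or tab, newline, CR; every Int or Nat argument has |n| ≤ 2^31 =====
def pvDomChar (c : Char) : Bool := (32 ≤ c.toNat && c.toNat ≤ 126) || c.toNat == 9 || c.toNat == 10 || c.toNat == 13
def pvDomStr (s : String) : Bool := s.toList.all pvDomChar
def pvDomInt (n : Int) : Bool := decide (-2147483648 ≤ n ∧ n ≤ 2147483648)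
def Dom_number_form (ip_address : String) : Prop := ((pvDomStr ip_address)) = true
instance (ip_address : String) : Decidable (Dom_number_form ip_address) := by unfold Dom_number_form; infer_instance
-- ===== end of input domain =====

-- B replaces A's Horner accumulate-then-shift loop (with its trailing corrective right shift)
-- by a direct positional place-value sum over the enumerated dotted groups; same cost, simpler.


-- ===== PORT A =====
-- ip_address_numbers = list(map(int, ip_address.split("."))); Pre_ guarantees every int() succeeds,
-- so the .getD 0 default is never the value used on admitted inputs.
def number_form (ip_address : String) : Int :=
  let ip_address_numbers : List Int :=
    ((PySem.Str.split? ip_address ".").getD []).map (fun s => (PySem.Int.ofStr? s).getD 0)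
  let result : Int := ip_address_numbers.foldl (fun result v => (result + v) <<< (8 : Nat)) 0
  result >>> (8 : Nat)

-- ===== PORT B =====
-- sum(int(v) << (8*(n-1-i)) for i, v in enumerate(parts)); the shift amount 8*(n-1-i) is a
-- nonnegative Python int for every enumerated index, so .toNat is exact.
def number_form_alt (ip_address : String) : Int :=
  let parts : List String := (PySem.Str.split? ip_address ".").getD []
  let n : Int := parts.length
  (PySem.List.enumerate parts 0).foldl
    (fun acc iv => acc + ((PySem.Int.ofStr? iv.2).getD 0) <<< (8 * (n - 1 - iv.1)).toNat) 0

-- ===== PRECONDITION & SPEC =====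
-- Pre_: Python's int() must succeed on every dotted group, else A (and B) raise ValueError.
def Pre_number_form (ip_address : String) : Prop :=
  ∀ s ∈ (PySem.Str.split? ip_address ".").getD [], (PySem.Int.ofStr? s).isSome = true
instance (ip_address : String) : Decidable (Pre_number_form ip_address) := by
  unfold Pre_number_form; infer_instance
def pvWitness_number_form : String := "192.168.0.1"

def Spec_number_form (ip_address : String) (out : Int) : Prop := out = number_form_alt ip_address
instance (ip_address : String) (out : Int) : Decidable (Spec_number_form ip_address out) := by unfold Spec_number_form; infer_instance

-- ===== CLAIM (what is proved, stated in full; the proofs are below) =====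
def Claim_equal_number_form : Prop := ∀ (ip_address : String), Dom_number_form ip_address → Pre_number_form ip_address → Spec_number_form ip_address (number_form ip_address)

-- ===== LEMMAS AND PROOFS =====

-- value of one dotted group, as both ports compute it
def pvVal (s : String) : Int := (PySem.Int.ofStr? s).getD 0

-- place-value sum: head group weighted by 256^(number of remaining groups)
def pvSum : List String → Int
  | [] => 0
  | s :: t => pvVal s * 2 ^ (8 * t.length) + pvSum t

-- A's Horner loop, with general accumulator
theorem pvHorner (l : List String) (r : Int) :
    (l.map pvVal).foldl (fun (result v : Int) => (result + v) <<< (8 : Nat)) r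
      = (2 : Int) ^ (8 * l.length) * r + 256 * pvSum l := by
  induction l generalizing r with
  | nil => simp [pvSum]
  | cons s t ih =>
    simp only [List.map_cons, List.foldl_cons, pvSum, List.length_cons]
    rw [ih, Int.shiftLeft_eq]
    ring

-- B's enumerated fold, with general start index and accumulator
theorem pvEnumFold (n : Int) (l : List String) (k acc : Int)
    (hk : k + l.length = n) :
    (PySem.List.enumerate l k).foldl
      (fun acc iv => acc + pvVal iv.2 <<< (8 * (n - 1 - iv.1)).toNat) acc
      = acc + pvSum l := by
  induction l generalizing k acc with
  | nil => simp [PySem.List.enumerate_nil, pvSum]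
  | cons s t ih =>
    rw [PySem.List.enumerate_cons, List.foldl_cons,
        ih (k + 1) _ (by simp only [List.length_cons] at hk; push_cast at hk ⊢; omega)]
    have hw : (8 * (n - 1 - k)).toNat = 8 * t.length := by
      simp only [List.length_cons] at hk; push_cast at hk; omega
    simp only [pvSum, hw, Int.shiftLeft_eq]
    ring

-- ===== VERDICT (by name: the statement is the Claim_ definition above) =====
theorem number_form_spec : Claim_equal_number_form := by
  intro ip _ _
  unfold Spec_number_form
  simp only [number_form, number_form_alt]
  rw [show (fun s => (PySem.Int.ofStr? s).getD 0) = pvVal from rfl,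
      show (fun (acc : Int) (iv : Int × String) =>
              acc + (PySem.Int.ofStr? iv.2).getD 0 <<<
                (8 * ((((PySem.Str.split? ip ".").getD []).length : Int) - 1 - iv.1)).toNat)
            = (fun (acc : Int) (iv : Int × String) =>
              acc + pvVal iv.2 <<<
                (8 * ((((PySem.Str.split? ip ".").getD []).length : Int) - 1 - iv.1)).toNat)
        from rfl]
  rw [pvHorner, pvEnumFold (((PySem.Str.split? ip ".").getD []).length : Int) _ 0 0 (by simp)]
  rw [Int.shiftRight_eq_div_pow]
  omega
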